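-- pv_equiv track=rewrite | github.com/ahyangyi/agrf | agrf/lib/building/symmetry.py | __canonicalize_descriptor
-- ===== SOURCE A (Python) =====
-- def __canonicalize_descriptor(descriptor):
--     ret = []
--     assignment = {}
--     for x in descriptor:
--         if x not in assignment:
--             assignment[x] = len(assignment)
--         ret.append(assignment[x])
--     return tuple(ret)
-- ===== SOURCE B (Python) =====
-- def __canonicalize_descriptor(descriptor):
--     # Rank-by-position: record each value's first-occurrence position, then a
--     # value's label is the rank of that position among all first positions
--     # (obtained by sorting them); finally map every element to its rank.
--     first = {}
--     for i, x in enumerate(descriptor):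
--         first.setdefault(x, i)
--     rank = {p: r for r, p in enumerate(sorted(first.values()))}
--     return tuple(rank[first[x]] for x in descriptor)
-- ===== Notes on version B (the rewrite author's own statement) =====
-- stated objective: alternative
-- what changed: B labels by position-ranking instead of A's incremental counting: it records each value's first-occurrence position, sorts those positions to turn each position into a rank, and maps every element to the rank of its value's first position; A instead assigns labels on the fly as the current size of a growing assignment dict.
import Mathlib
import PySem

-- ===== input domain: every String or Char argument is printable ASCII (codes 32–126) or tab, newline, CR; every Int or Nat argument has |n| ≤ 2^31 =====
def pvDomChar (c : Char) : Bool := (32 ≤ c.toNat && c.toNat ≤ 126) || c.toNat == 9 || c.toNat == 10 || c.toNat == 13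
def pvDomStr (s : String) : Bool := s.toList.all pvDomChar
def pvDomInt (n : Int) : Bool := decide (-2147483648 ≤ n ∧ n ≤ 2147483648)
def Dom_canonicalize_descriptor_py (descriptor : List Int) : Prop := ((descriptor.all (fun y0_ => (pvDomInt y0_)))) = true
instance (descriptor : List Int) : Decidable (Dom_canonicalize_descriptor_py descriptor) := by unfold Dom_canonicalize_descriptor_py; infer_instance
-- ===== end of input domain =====

-- B replaces A's incremental-counter labeling by a position-ranking algorithm
-- (record first-occurrence positions, sort them into ranks, map elements to ranks);
-- same results, proved equal; B is O(n log n) where A is O(n) (objective: alternative).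


-- ===== PORT A =====
-- A's loop body: grow the assignment dict if x is new, then append assignment[x]
-- (the lookup always succeeds, so the total getD form is exact).
def pvStepA (st : List Int × PySem.Dict Int Int) (x : Int) : List Int × PySem.Dict Int Int :=
  let asg := if st.2.contains x then st.2 else st.2.insert x (PySem.Dict.size st.2)
  (st.1 ++ [asg.getD x 0], asg)

def canonicalize_descriptor_py (descriptor : List Int) : List Int :=
  (descriptor.foldl pvStepA ([], PySem.Dict.empty)).1

-- ===== PORT B =====
-- for i, x in enumerate(descriptor): first.setdefault(x, i)
def pvFirst (descriptor : List Int) : PySem.Dict Int Int :=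
  (PySem.List.enumerate descriptor).foldl (fun d p => d.setdefault p.2 p.1) PySem.Dict.empty

-- {p: r for r, p in enumerate(sorted(ps))}
def pvRankMap (ps : List Int) : PySem.Dict Int Int :=
  (PySem.List.enumerate (PySem.List.sorted ps (fun x => x) false)).foldl
    (fun d p => d.insert p.2 p.1) PySem.Dict.empty

def canonicalize_descriptor_py_alt (descriptor : List Int) : List Int :=
  let first := pvFirst descriptor
  let rank := pvRankMap first.values
  -- rank[first[x]]: both lookups always hit a key, so the total getD form is exact
  descriptor.map (fun x => rank.getD (first.getD x 0) 0)

-- ===== PRECONDITION & SPEC =====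
def Spec_canonicalize_descriptor_py (descriptor : List Int) (out : List Int) : Prop := out = canonicalize_descriptor_py_alt descriptor
instance (descriptor : List Int) (out : List Int) : Decidable (Spec_canonicalize_descriptor_py descriptor out) := by unfold Spec_canonicalize_descriptor_py; infer_instance

-- ===== CLAIM (what is proved, stated in full; the proofs are below) =====
def Claim_equal_canonicalize_descriptor_py : Prop := ∀ (descriptor : List Int), Dom_canonicalize_descriptor_py descriptor → Spec_canonicalize_descriptor_py descriptor (canonicalize_descriptor_py descriptor)

-- ===== LEMMAS AND PROOFS =====

-- enumerate-then-insert dict over a fresh distinct list: value ↦ its index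
def pvMkMap (uniques : List Int) : PySem.Dict Int Int :=
  (PySem.List.enumerate uniques).foldl (fun d p => d.insert p.2 p.1) PySem.Dict.empty

theorem pvRankMap_eq (ps : List Int) :
    pvRankMap ps = pvMkMap (PySem.List.sorted ps (fun x => x) false) := rfl

-- the label sequence of l, continuing from the already-seen uniques u
def pvLab (u l : List Int) : List Int :=
  match l with
  | [] => []
  | x :: xs =>
      let u' := PySem.Set.add u x
      (((PySem.List.index? u' x).getD 0 : Nat) : Int) :: pvLab u' xs

theorem pvEnumerate_append_singleton (u : List Int) (x : Int) (s : Int) :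
    PySem.List.enumerate (u ++ [x]) s = PySem.List.enumerate u s ++ [(s + (u.length : Int), x)] := by
  induction u generalizing s with
  | nil => simp [PySem.List.enumerate_nil, PySem.List.enumerate_cons]
  | cons y ys ih =>
      have hnum : s + 1 + (ys.length : Int) = s + ((ys.length : Int) + 1) := by ring
      simp only [List.cons_append, PySem.List.enumerate_cons, ih (s + 1), List.length_cons,
        Nat.cast_add, Nat.cast_one, hnum]

theorem pvNodup_append_singleton (u : List Int) (x : Int) (hu : u.Nodup) (h : x ∉ u) :
    (u ++ [x]).Nodup := by
  refine List.Nodup.append hu (List.nodup_singleton x) ?_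
  intro a ha hax
  rw [List.mem_singleton] at hax
  exact h (hax ▸ ha)

theorem pvMkMap_items (u : List Int) (hu : u.Nodup) :
    (pvMkMap u).items = (PySem.List.enumerate u).map (fun p => (p.2, p.1)) := by
  have h1 : ∀ a ∈ PySem.List.enumerate u, (PySem.Dict.empty : PySem.Dict Int Int).contains a.2 = false :=
    fun a _ => PySem.Dict.contains_empty _
  have h2 : ((PySem.List.enumerate u).map (fun p : Int × Int => p.2)).Nodup := by
    rw [PySem.List.map_snd_enumerate]; exact hu
  have := PySem.Dict.items_foldl_insert_fresh (PySem.List.enumerate u)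
    (fun p : Int × Int => p.2) (fun p : Int × Int => p.1) PySem.Dict.empty h1 h2
  simpa [pvMkMap] using this

theorem pvMkMap_keys (u : List Int) (hu : u.Nodup) : (pvMkMap u).keys = u := by
  simp only [PySem.Dict.keys, pvMkMap_items u hu, List.map_map]
  exact PySem.List.map_snd_enumerate u 0

theorem pvMkMap_contains (u : List Int) (hu : u.Nodup) (x : Int) :
    (pvMkMap u).contains x = decide (x ∈ u) := by
  rw [PySem.Dict.contains_eq_decide_mem_keys, pvMkMap_keys u hu]

theorem pvMkMap_size (u : List Int) (hu : u.Nodup) : PySem.Dict.size (pvMkMap u) = u.length := by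
  simp [PySem.Dict.size, pvMkMap_items u hu, PySem.List.length_enumerate]

theorem pvMem_enumerate (u : List Int) (k : Nat) (s : Int) (hk : k < u.length) :
    ((s + (k : Int), u[k]) ∈ PySem.List.enumerate u s) := by
  induction u generalizing k s with
  | nil => simp at hk
  | cons y ys ih =>
      rw [PySem.List.enumerate_cons]
      cases k with
      | zero => simp
      | succ k' =>
          right
          have := ih k' (s + 1) (by simpa using hk)
          simpa [add_assoc, add_comm, add_left_comm] using this

theorem pvMkMap_getD (u : List Int) (hu : u.Nodup) (x : Int) (hx : x ∈ u) :
    (pvMkMap u).getD x 0 = (((PySem.List.index? u x).getD 0 : Nat) : Int) := by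
  obtain ⟨k, hk⟩ := Option.isSome_iff_exists.mp ((PySem.List.index?_isSome_iff u x).mpr hx)
  obtain ⟨hlt, hget, -⟩ := PySem.List.getElem_of_index?_eq_some hk
  have hmem : (x, (k : Int)) ∈ (pvMkMap u).items := by
    rw [pvMkMap_items u hu]
    refine List.mem_map.mpr ⟨((k : Int), x), ?_, rfl⟩
    have := pvMem_enumerate u k 0 hlt
    simpa [hget] using this
  rw [PySem.Dict.getD_of_mem_items (pvMkMap u) hmem (by rw [pvMkMap_keys u hu]; exact hu), hk]
  simp

theorem pvMkMap_append (u : List Int) (x : Int) (hx : x ∉ u) (hu : u.Nodup) :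
    (pvMkMap u).insert x ((u.length : Nat) : Int) = pvMkMap (u ++ [x]) := by
  apply PySem.Dict.ext
  rw [PySem.Dict.items_insert_of_not_contains (pvMkMap u) _
        (by rw [pvMkMap_contains u hu]; simp [hx]),
      pvMkMap_items u hu, pvMkMap_items (u ++ [x]) (pvNodup_append_singleton u x hu hx),
      pvEnumerate_append_singleton u x 0]
  simp

-- the final uniques list extends the current one
theorem pvFoldl_add_extension (l u : List Int) :
    ∃ t, l.foldl PySem.Set.add u = u ++ t := by
  induction l generalizing u with
  | nil => exact ⟨[], by simp⟩
  | cons x xs ih =>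
      obtain ⟨t, ht⟩ := ih (PySem.Set.add u x)
      rw [PySem.Set.add_eq_ite] at ht
      by_cases h : x ∈ u
      · exact ⟨t, by simpa [List.foldl_cons, PySem.Set.add_eq_ite, h] using ht⟩
      · exact ⟨x :: t, by simpa [List.foldl_cons, PySem.Set.add_eq_ite, h] using ht⟩

theorem pvNodup_add (u : List Int) (x : Int) (hu : u.Nodup) : (PySem.Set.add u x).Nodup := by
  rw [PySem.Set.add_eq_ite]
  by_cases h : x ∈ u
  · simpa [h] using hu
  · simpa [h] using pvNodup_append_singleton u x hu h

-- A's loop, started at any already-seen uniques u, produces the continued labels of pvLab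
theorem pvLoopA (l : List Int) (r u : List Int) (hu : u.Nodup) :
    l.foldl pvStepA (r, pvMkMap u) = (r ++ pvLab u l, pvMkMap (l.foldl PySem.Set.add u)) := by
  induction l generalizing r u with
  | nil => simp [pvLab]
  | cons x xs ih =>
      rw [List.foldl_cons, List.foldl_cons]
      by_cases h : x ∈ u
      · have hstep : pvStepA (r, pvMkMap u) x
            = (r ++ [(((PySem.List.index? u x).getD 0 : Nat) : Int)], pvMkMap u) := by
          simp [pvStepA, pvMkMap_contains u hu, h, pvMkMap_getD u hu x h]
        rw [hstep, ih _ u hu]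
        simp [pvLab, PySem.Set.add_of_mem h]
      · have hnd : (u ++ [x]).Nodup := pvNodup_append_singleton u x hu h
        have hidx : PySem.List.index? (u ++ [x]) x = some u.length :=
          PySem.List.index?_append_singleton_self u x h
        have hidx2 : List.idxOf? x (u ++ [x]) = some u.length := by simpa using hidx
        have hc : (pvMkMap u).contains x = false := by
          rw [pvMkMap_contains u hu]; simp [h]
        have hstep : pvStepA (r, pvMkMap u) x
            = (r ++ [((u.length : Nat) : Int)], pvMkMap (u ++ [x])) := by
          unfold pvStepA
          rw [hc]
          simp only [Bool.false_eq_true, if_false, pvMkMap_size u hu, pvMkMap_append u x h hu]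
          rw [pvMkMap_getD (u ++ [x]) hnd x (by simp), hidx]
          simp
        rw [hstep, ih _ (u ++ [x]) hnd]
        simp [pvLab, PySem.Set.add_of_not_mem h, hidx2]

-- the continued labels are exactly the indices in the FINAL uniques list
theorem pvLab_eq_map (l u : List Int) (hu : u.Nodup) :
    pvLab u l = l.map (fun x => (((PySem.List.index? (l.foldl PySem.Set.add u) x).getD 0 : Nat) : Int)) := by
  induction l generalizing u with
  | nil => simp [pvLab]
  | cons x xs ih =>
      rw [List.foldl_cons]
      have hx : x ∈ PySem.Set.add u x := by
        rw [PySem.Set.add_eq_ite]; by_cases h : x ∈ u <;> simp [h]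
      obtain ⟨t, ht⟩ := pvFoldl_add_extension xs (PySem.Set.add u x)
      have hidx : PySem.List.index? (xs.foldl PySem.Set.add (PySem.Set.add u x)) x
          = PySem.List.index? (PySem.Set.add u x) x := by
        rw [ht]; exact PySem.List.index?_append_of_mem t hx
      simp only [pvLab, List.map_cons, hidx, ih (PySem.Set.add u x) (pvNodup_add u x hu)]

theorem pvDedup_eq_foldl (l : List Int) : PySem.List.dedup l = l.foldl PySem.Set.add [] := by
  rw [PySem.List.dedup_eq_ofList, PySem.Set.ofList_eq_foldl]

-- ===== B-side machinery: the setdefault loop records first-occurrence positions =====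

-- the fresh (key, position) pairs emitted by B's setdefault loop over l starting at
-- position s, when ks are the keys already present
def pvNew (ks : List Int) (l : List Int) (s : Int) : List (Int × Int) :=
  match l with
  | [] => []
  | x :: xs =>
      if x ∈ ks then pvNew ks xs (s + 1)
      else (x, s) :: pvNew (ks ++ [x]) xs (s + 1)

theorem pvFirst_items_aux (l : List Int) (s : Int) (d : PySem.Dict Int Int) (hd : d.keys.Nodup) :
    ((PySem.List.enumerate l s).foldl (fun d p => d.setdefault p.2 p.1) d).items
      = d.items ++ pvNew d.keys l s := by
  induction l generalizing s d with
  | nil => simp [PySem.List.enumerate_nil, pvNew]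
  | cons x xs ih =>
      rw [PySem.List.enumerate_cons, List.foldl_cons]
      by_cases h : x ∈ d.keys
      · have hc : d.contains x = true := by
          rw [PySem.Dict.contains_eq_decide_mem_keys]; simpa using h
        rw [PySem.Dict.setdefault_of_contains d s hc, ih (s + 1) d hd]
        simp [pvNew, h]
      · have hc : d.contains x = false := by
          rw [PySem.Dict.contains_eq_decide_mem_keys]; simpa using h
        rw [PySem.Dict.setdefault_of_not_contains d s hc,
            ih (s + 1) (d.insert x s)
              (by rw [PySem.Dict.keys_insert_of_not_contains d s hc]
                  exact pvNodup_append_singleton _ _ hd h),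
            PySem.Dict.items_insert_of_not_contains d s hc,
            PySem.Dict.keys_insert_of_not_contains d s hc]
        simp [pvNew, h]

-- the keys emitted continue the Set.add fold
theorem pvNew_map_fst (l : List Int) (ks : List Int) (s : Int) :
    l.foldl PySem.Set.add ks = ks ++ (pvNew ks l s).map Prod.fst := by
  induction l generalizing ks s with
  | nil => simp [pvNew]
  | cons x xs ih =>
      rw [List.foldl_cons, PySem.Set.add_eq_ite]
      by_cases h : x ∈ ks
      · rw [if_pos h]
        simpa [pvNew, h] using ih ks (s + 1)
      · rw [if_neg h, ih (ks ++ [x]) (s + 1)]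
        simp [pvNew, h]

-- each fresh value appears paired with its first-occurrence position
theorem pvNew_mem (l : List Int) (ks : List Int) (s : Int) (x : Int)
    (hx : x ∈ l) (hks : x ∉ ks) :
    (x, s + (((PySem.List.index? l x).getD 0 : Nat) : Int)) ∈ pvNew ks l s := by
  induction l generalizing ks s with
  | nil => simp at hx
  | cons y ys ih =>
      by_cases hxy : x = y
      · subst hxy
        rw [PySem.List.index?_cons_self]
        simp [pvNew, hks]
      · have hxys : x ∈ ys := by
          rcases List.mem_cons.mp hx with h | h
          · exact absurd h hxy
          · exact h
        have hidx : PySem.List.index? (y :: ys) x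
            = Option.map (fun k => k + 1) (PySem.List.index? ys x) :=
          PySem.List.index?_cons_of_ne ys (Ne.symm hxy)
        obtain ⟨k, hk⟩ := Option.isSome_iff_exists.mp
          ((PySem.List.index?_isSome_iff ys x).mpr hxys)
        have hval : s + (((PySem.List.index? (y :: ys) x).getD 0 : Nat) : Int)
            = (s + 1) + (((PySem.List.index? ys x).getD 0 : Nat) : Int) := by
          rw [hidx, hk]
          simp
          ring
        rw [hval]
        by_cases h : y ∈ ks
        · simpa [pvNew, h] using ih ks (s + 1) hxys hks
        · have hks' : x ∉ ks ++ [y] := by simp [hks, hxy]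
          simp only [pvNew, h, if_false]
          exact List.mem_cons.mpr (Or.inr (ih (ks ++ [y]) (s + 1) hxys hks'))

-- emitted positions are strictly increasing (and bounded below by s)
theorem pvNew_snd_mono (l : List Int) (ks : List Int) (s : Int) :
    ((pvNew ks l s).Pairwise (fun p q => p.2 < q.2)) ∧ (∀ p ∈ pvNew ks l s, s ≤ p.2) := by
  induction l generalizing ks s with
  | nil => simp [pvNew]
  | cons x xs ih =>
      by_cases h : x ∈ ks
      · obtain ⟨h1, h2⟩ := ih ks (s + 1)
        refine ⟨by simpa [pvNew, h] using h1, ?_⟩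
        intro p hp
        have := h2 p (by simpa [pvNew, h] using hp)
        omega
      · obtain ⟨h1, h2⟩ := ih (ks ++ [x]) (s + 1)
        refine ⟨?_, ?_⟩
        · simp only [pvNew, h, if_false]
          exact List.Pairwise.cons (fun q hq => by have := h2 q hq; omega) h1
        · intro p hp
          simp only [pvNew, h, if_false, List.mem_cons] at hp
          rcases hp with rfl | hp
          · simp
          · have := h2 p hp; omega

-- index? through the two projections of a pair list with distinct keys and values
theorem pvIndex?_map_snd_fst (ps : List (Int × Int)) (p : Int × Int)
    (hp : p ∈ ps) (hf : (ps.map Prod.fst).Nodup) (hs : (ps.map Prod.snd).Nodup) :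
    PySem.List.index? (ps.map Prod.snd) p.2 = PySem.List.index? (ps.map Prod.fst) p.1 := by
  induction ps with
  | nil => simp at hp
  | cons q qs ih =>
      simp only [List.map_cons, List.nodup_cons] at hf hs
      rcases List.mem_cons.mp hp with rfl | hp'
      · rw [List.map_cons, List.map_cons, PySem.List.index?_cons_self, PySem.List.index?_cons_self]
      · have hf1 : q.1 ≠ p.1 := fun he => hf.1 (List.mem_map.mpr ⟨p, hp', he.symm⟩)
        have hs1 : q.2 ≠ p.2 := fun he => hs.1 (List.mem_map.mpr ⟨p, hp', he.symm⟩)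
        rw [List.map_cons, List.map_cons,
            PySem.List.index?_cons_of_ne _ hs1, PySem.List.index?_cons_of_ne _ hf1,
            ih hp' hf.2 hs.2]

-- ===== VERDICT (by name: the statement is the Claim_ definition above) =====
theorem canonicalize_descriptor_py_spec : Claim_equal_canonicalize_descriptor_py := by
  intro descriptor _
  unfold Spec_canonicalize_descriptor_py canonicalize_descriptor_py canonicalize_descriptor_py_alt
  -- A's side: labels are indices in U := the first-occurrence uniques list
  have hA := pvLoopA descriptor [] [] (by simp)
  have hempty : pvMkMap [] = PySem.Dict.empty := by
    simp [pvMkMap, PySem.List.enumerate_nil]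
  rw [← hempty, hA]
  simp only [List.nil_append, pvLab_eq_map descriptor [] (by simp)]
  -- B's side
  set U := descriptor.foldl PySem.Set.add [] with hU
  have hndU : U.Nodup := by
    rw [hU, ← pvDedup_eq_foldl]; exact PySem.List.nodup_dedup descriptor
  set ps := pvNew [] descriptor 0 with hps
  have hitems : (pvFirst descriptor).items = ps := by
    simpa using pvFirst_items_aux descriptor 0 PySem.Dict.empty (by simp [PySem.Dict.keys_empty])
  have hfst : ps.map Prod.fst = U := by
    have := pvNew_map_fst descriptor [] 0
    rw [← hps, ← hU] at this
    simpa using this.symm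
  have hkeys : (pvFirst descriptor).keys = U := by
    simp only [PySem.Dict.keys, hitems]
    exact hfst
  have hndkeys : (pvFirst descriptor).keys.Nodup := by rw [hkeys]; exact hndU
  obtain ⟨hpair, -⟩ := pvNew_snd_mono descriptor [] 0
  rw [← hps] at hpair
  have hndsnd : (ps.map Prod.snd).Nodup :=
    (List.pairwise_map.mpr hpair).imp (fun h => ne_of_lt h)
  have hvalues : (pvFirst descriptor).values = ps.map Prod.snd := by
    simp only [PySem.Dict.values, hitems]
  have hsorted : PySem.List.sorted ((pvFirst descriptor).values) (fun x => x) false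
      = ps.map Prod.snd := by
    rw [hvalues]
    exact PySem.List.sorted_eq_self_of_pairwise _ _
      ((List.pairwise_map.mpr hpair).imp (fun h => le_of_lt h))
  apply List.map_congr_left
  intro x hx
  have hmemps : (x, (((PySem.List.index? descriptor x).getD 0 : Nat) : Int)) ∈ ps := by
    have := pvNew_mem descriptor [] 0 x hx (by simp)
    rw [← hps] at this
    simpa using this
  have hgetfirst : (pvFirst descriptor).getD x 0
      = (((PySem.List.index? descriptor x).getD 0 : Nat) : Int) := by
    exact PySem.Dict.getD_of_mem_items (pvFirst descriptor) (by rw [hitems]; exact hmemps) hndkeys 0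
  have hmemsnd : (((PySem.List.index? descriptor x).getD 0 : Nat) : Int) ∈ ps.map Prod.snd :=
    List.mem_map.mpr ⟨_, hmemps, rfl⟩
  have hrank : (pvRankMap ((pvFirst descriptor).values)).getD ((pvFirst descriptor).getD x 0) 0
      = (((PySem.List.index? (ps.map Prod.snd)
            ((((PySem.List.index? descriptor x).getD 0 : Nat)) : Int)).getD 0 : Nat) : Int) := by
    rw [pvRankMap_eq, hsorted, hgetfirst]
    exact pvMkMap_getD (ps.map Prod.snd) hndsnd _ hmemsnd
  rw [hrank, hgetfirst] at *
  rw [pvIndex?_map_snd_fst ps (x, (((PySem.List.index? descriptor x).getD 0 : Nat) : Int))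
        hmemps (by rw [hfst]; exact hndU) hndsnd]
  simp [hfst]
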